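-- pv_equiv track=rewrite | github.com/danlonngren/log-compactor | compactLog.py | compact_lines
-- ===== SOURCE A (Python) =====
-- def compact_lines(lines):
--     prev_line = None
--     count = 0
--     for line in lines:
--         line = line.rstrip('\n')
--         if line == prev_line:
--             count += 1
--         else:
--             if prev_line is not None:
--                 if count > 1:
--                     yield f"{prev_line} (x{count})"
--                 else:
--                     yield prev_line
--             prev_line = line
--             count = 1
--     if prev_line is not None:
--         if count > 1:
--             yield f"{prev_line} (x{count})"
--         else:
--             yield prev_line
-- ===== SOURCE B (Python) =====
-- def compact_lines(lines):
--     stripped = [line.rstrip('\n') for line in lines]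
--     n = len(stripped)
--     i = 0
--     while i < n:
--         key = stripped[i]
--         j = i + 1
--         while j < n and stripped[j] == key:
--             j += 1
--         run = j - i
--         yield f"{key} (x{run})" if run > 1 else key
--         i = j
-- ===== Notes on version B (the rewrite author's own statement) =====
-- stated objective: alternative
-- what changed: Replaces A's prev_line/count state machine with its duplicated end-of-loop flush by a run-detection scan: strip all lines first, then for each position find the end of the run of equal lines with an inner scan and emit one output per run.
import Mathlib
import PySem

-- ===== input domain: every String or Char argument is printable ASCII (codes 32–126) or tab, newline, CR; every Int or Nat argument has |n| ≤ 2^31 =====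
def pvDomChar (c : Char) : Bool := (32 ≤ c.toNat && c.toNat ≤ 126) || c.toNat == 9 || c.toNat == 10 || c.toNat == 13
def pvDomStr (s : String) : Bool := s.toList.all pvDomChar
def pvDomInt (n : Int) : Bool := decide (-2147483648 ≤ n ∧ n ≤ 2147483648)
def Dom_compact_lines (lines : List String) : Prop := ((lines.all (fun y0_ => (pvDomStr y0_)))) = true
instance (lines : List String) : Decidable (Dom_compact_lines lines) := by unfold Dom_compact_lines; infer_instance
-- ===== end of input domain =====

-- B replaces A's prev_line/count state machine (with its duplicated flush) by a run-detection
-- scan over the pre-stripped lines; same output, same cost (objective: alternative).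

-- line.rstrip('\n'): drop all trailing '\n' characters (exact; PySem has no rstrip-with-chars)
def pvRstripNl (s : String) : String :=
  String.ofList ((s.toList.reverse.dropWhile (fun c => c == '\n')).reverse)

-- f"{p} (x{c})" if c > 1 else p  (shared formatting of one run)
def pvFmt (p : String) (c : Int) : String :=
  if c > 1 then p ++ " (x" ++ PySem.Int.toStr c ++ ")" else p

-- ===== PORT A =====
-- loop state: (prev_line : Option String, count : Int, emitted so far)
def pvStepA (st : Option String × Int × List String) (l : String) :
    Option String × Int × List String :=
  match st with
  | (prev, count, acc) =>
    if prev == some l then (prev, count + 1, acc)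
    else
      match prev with
      | none => (some l, 1, acc)
      | some p => (some l, 1, acc ++ [pvFmt p count])

-- the final 'if prev_line is not None' flush
def pvFinishA (st : Option String × Int × List String) : List String :=
  match st with
  | (none, _, acc) => acc
  | (some p, count, acc) => acc ++ [pvFmt p count]

def compact_lines (lines : List String) : List String :=
  pvFinishA (lines.foldl (fun st line => pvStepA st (pvRstripNl line)) (none, 0, []))

-- ===== PORT B =====
-- outer loop of Source B: take the run of lines equal to the head, emit one line per run
def pvRunsB : List String → List String
  | [] => []
  | x :: xs =>
      pvFmt x ((xs.takeWhile (fun y => y == x)).length + 1) ::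
        pvRunsB (xs.dropWhile (fun y => y == x))
termination_by l => l.length
decreasing_by
  simp only [List.length_cons]
  exact Nat.lt_succ_of_le (List.length_dropWhile_le _ _)

def compact_lines_alt (lines : List String) : List String :=
  pvRunsB (lines.map pvRstripNl)

-- ===== PRECONDITION & SPEC =====
def Spec_compact_lines (lines : List String) (out : List String) : Prop := out = compact_lines_alt lines
instance (lines : List String) (out : List String) : Decidable (Spec_compact_lines lines out) := by unfold Spec_compact_lines; infer_instance

-- ===== CLAIM (what is proved, stated in full; the proofs are below) =====
def Claim_equal_compact_lines : Prop := ∀ (lines : List String), Dom_compact_lines lines → Spec_compact_lines lines (compact_lines lines)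

-- ===== LEMMAS AND PROOFS =====

-- the emitted-so-far accumulator only ever grows at the back, so it factors out
lemma pvFinishA_acc (L : List String) :
    ∀ (P : Option String) (c : Int) (acc : List String),
      pvFinishA (L.foldl pvStepA (P, c, acc)) =
        acc ++ pvFinishA (L.foldl pvStepA (P, c, [])) := by
  induction L with
  | nil =>
    intro P c acc
    cases P <;> simp [pvFinishA]
  | cons x xs ih =>
    intro P c acc
    cases P with
    | none =>
      simp only [List.foldl_cons, pvStepA]
      exact ih _ _ _
    | some p =>
      by_cases h : p = x
      · subst h
        simp only [List.foldl_cons, pvStepA, beq_self_eq_true, if_true]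
        exact ih _ _ _
      · have hb : (some p == some x) = false := by simp [h]
        simp only [List.foldl_cons, pvStepA, hb, Bool.false_eq_true, if_false]
        rw [ih (some x) 1 (acc ++ [pvFmt p c]), ih (some x) 1 ([] ++ [pvFmt p c])]
        simp only [List.nil_append, List.append_assoc]

-- a live run (prev = some p, count = c) ends as one formatted line for the whole run
lemma pvKey (L : List String) :
    ∀ (p : String) (c : Int),
      pvFinishA (L.foldl pvStepA (some p, c, [])) =
        pvFmt p (c + (L.takeWhile (fun y => y == p)).length) ::
          pvRunsB (L.dropWhile (fun y => y == p)) := by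
  induction L with
  | nil =>
    intro p c
    simp [pvFinishA, pvRunsB]
  | cons x xs ih =>
    intro p c
    by_cases h : x = p
    · subst h
      simp only [List.foldl_cons, pvStepA, beq_self_eq_true, if_true,
        List.takeWhile_cons, List.dropWhile_cons, List.length_cons]
      rw [ih x (c + 1)]
      congr 2
      push_cast
      ring
    · have hb : (some p == some x) = false := by
        rw [beq_eq_false_iff_ne]
        simp only [ne_eq, Option.some.injEq]
        exact fun e => h e.symm
      have hb' : (x == p) = false := by simp [h]
      simp only [List.foldl_cons, pvStepA, hb, hb', Bool.false_eq_true, if_false,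
        List.takeWhile_cons, List.dropWhile_cons]
      rw [pvFinishA_acc, ih x 1, pvRunsB]
      simp only [List.length_nil, Int.natCast_zero, add_zero, List.nil_append,
        List.singleton_append]
      congr 3
      ring

lemma pvMain (lines : List String) : compact_lines lines = compact_lines_alt lines := by
  unfold compact_lines compact_lines_alt
  have h1 : lines.foldl (fun st line => pvStepA st (pvRstripNl line)) (none, 0, []) =
      (lines.map pvRstripNl).foldl pvStepA (none, 0, []) := by
    rw [List.foldl_map]
  rw [h1]
  cases hL : lines.map pvRstripNl with
  | nil => simp [pvFinishA, pvRunsB]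
  | cons x xs =>
    have hn : ((none : Option String) == some x) = false := rfl
    simp only [List.foldl_cons, pvStepA, hn, Bool.false_eq_true, if_false]
    rw [pvKey, pvRunsB]
    congr 2
    ring

-- ===== VERDICT (by name: the statement is the Claim_ definition above) =====
theorem compact_lines_spec : Claim_equal_compact_lines := by
  intro lines _
  unfold Spec_compact_lines
  exact pvMain lines
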